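-- pv_equiv track=rewrite | github.com/novasolve/ci-auto-rescue | src/nova/tools/patch_fixer.py | count_hunk_lines
-- ===== SOURCE A (Python) =====
-- from typing import List, Tuple
--
-- def count_hunk_lines(lines: List[str]) -> Tuple[int, int]:
--     """
--     Count the actual old and new lines in a hunk.
--
--     Args:
--         lines: Lines following a hunk header
--
--     Returns:
--         Tuple of (old_line_count, new_line_count)
--     """
--     old_count = 0
--     new_count = 0
--
--     for line in lines:
--         if line.startswith('@@'):
--             # Next hunk started
--             break
--         elif line.startswith('---') or line.startswith('+++'):
--             # File header for next file
--             break
--         elif line.startswith('-'):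
--             old_count += 1
--         elif line.startswith('+'):
--             new_count += 1
--         elif line.startswith(' ') or line == '':
--             # Context line
--             old_count += 1
--             new_count += 1
--         elif line.startswith('\\'):
--             # No newline indicator - don't count
--             continue
--         else:
--             # Assume it's a context line without prefix
--             old_count += 1
--             new_count += 1
--
--     return old_count, new_count
-- ===== SOURCE B (Python) =====
-- from typing import List, Tuple
-- from itertools import takewhile
--
-- def count_hunk_lines(lines: List[str]) -> Tuple[int, int]:
--     """Isolate the hunk body with takewhile, then count old/new in two passes."""
--     body = list(takewhile(
--         lambda l: not l.startswith(('@@', '---', '+++')), lines))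
--     old_count = sum(1 for l in body if not l.startswith(('+', '\\')))
--     new_count = sum(1 for l in body if not l.startswith(('-', '\\')))
--     return old_count, new_count
-- ===== Notes on version B (the rewrite author's own statement) =====
-- stated objective: alternative
-- what changed: Replaced the fused single-pass if/elif cascade with a terminate-then-two-passes decomposition: itertools.takewhile cuts the body at the first '@@'/'---'/'+++' line, then old and new counts are two independent generator-sum passes over that body.
import Mathlib
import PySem

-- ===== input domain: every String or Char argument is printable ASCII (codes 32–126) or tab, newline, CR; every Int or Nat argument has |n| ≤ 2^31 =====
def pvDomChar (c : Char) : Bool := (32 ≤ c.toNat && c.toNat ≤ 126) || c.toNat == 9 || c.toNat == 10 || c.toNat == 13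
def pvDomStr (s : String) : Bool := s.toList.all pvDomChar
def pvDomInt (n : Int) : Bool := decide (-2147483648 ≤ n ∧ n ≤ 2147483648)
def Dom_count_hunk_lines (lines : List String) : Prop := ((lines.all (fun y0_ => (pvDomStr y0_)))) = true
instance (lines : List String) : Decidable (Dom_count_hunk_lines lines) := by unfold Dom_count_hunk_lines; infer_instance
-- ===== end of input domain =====

-- B changes the decomposition only (terminate-then-two-passes instead of one fused cascade); same values, same cost.

-- ===== PORT A =====
-- the for-loop with break, as tail recursion over (old_count, new_count)
def pvCountA : List String → Int → Int → Int × Int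
  | [], o, n => (o, n)
  | l :: rest, o, n =>
    if PySem.Str.startswith l "@@" then (o, n)
    else if PySem.Str.startswith l "---" || PySem.Str.startswith l "+++" then (o, n)
    else if PySem.Str.startswith l "-" then pvCountA rest (o + 1) n
    else if PySem.Str.startswith l "+" then pvCountA rest o (n + 1)
    else if PySem.Str.startswith l " " || l == "" then pvCountA rest (o + 1) (n + 1)
    else if PySem.Str.startswith l "\\" then pvCountA rest o n
    else pvCountA rest (o + 1) (n + 1)

def count_hunk_lines (lines : List String) : Int × Int :=
  pvCountA lines 0 0

-- ===== PORT B =====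
def pvIsStop (l : String) : Bool :=
  PySem.Str.startswith l "@@" || PySem.Str.startswith l "---" || PySem.Str.startswith l "+++"

def pvOldLine (l : String) : Bool :=
  !(PySem.Str.startswith l "+" || PySem.Str.startswith l "\\")

def pvNewLine (l : String) : Bool :=
  !(PySem.Str.startswith l "-" || PySem.Str.startswith l "\\")

def count_hunk_lines_alt (lines : List String) : Int × Int :=
  let body := lines.takeWhile (fun l => !pvIsStop l)
  (((body.countP pvOldLine : Nat) : Int), ((body.countP pvNewLine : Nat) : Int))

-- ===== PRECONDITION & SPEC =====
def Spec_count_hunk_lines (lines : List String) (out : Int × Int) : Prop := out = count_hunk_lines_alt lines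
instance (lines : List String) (out : Int × Int) : Decidable (Spec_count_hunk_lines lines out) := by unfold Spec_count_hunk_lines; infer_instance

-- ===== CLAIM (what is proved, stated in full; the proofs are below) =====
def Claim_equal_count_hunk_lines : Prop := ∀ (lines : List String), Dom_count_hunk_lines lines → Spec_count_hunk_lines lines (count_hunk_lines lines)

-- ===== LEMMAS AND PROOFS =====

-- a character list cannot start with two different single characters
theorem sw_single_disj (cs : List Char) (c d : Char) (hcd : c ≠ d)
    (h : PySem.Chars.startswith cs [c] = true) :
    PySem.Chars.startswith cs [d] = false := by
  rw [PySem.Chars.startswith_iff] at h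
  by_contra hne
  rw [Bool.not_eq_false, PySem.Chars.startswith_iff] at hne
  obtain ⟨t1, h1⟩ := h
  obtain ⟨t2, h2⟩ := hne
  rw [← h1] at h2
  simp at h2
  exact hcd h2.1.symm

theorem main_lemma (lines : List String) :
    ∀ o n : Int, pvCountA lines o n =
      (o + ((lines.takeWhile (fun l => !pvIsStop l)).countP pvOldLine : Nat),
       n + ((lines.takeWhile (fun l => !pvIsStop l)).countP pvNewLine : Nat)) := by
  induction lines with
  | nil => intro o n; simp [pvCountA]
  | cons l rest ih =>
    intro o n
    by_cases h1 : PySem.Chars.startswith l.toList ['@', '@'] = true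
    · have hs : pvIsStop l = true := by simp [pvIsStop, h1]
      simp [pvCountA, h1, hs]
    · by_cases h2 : (PySem.Chars.startswith l.toList ['-', '-', '-'] = true ∨
          PySem.Chars.startswith l.toList ['+', '+', '+'] = true)
      · have hs : pvIsStop l = true := by
          rcases h2 with h | h <;> simp [pvIsStop, h]
        rcases h2 with h | h <;> simp [pvCountA, h1, h, hs]
      · push Not at h2
        have h2a : PySem.Chars.startswith l.toList ['-', '-', '-'] = false := by
          simpa using h2.1
        have h2b : PySem.Chars.startswith l.toList ['+', '+', '+'] = false := by
          simpa using h2.2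
        have hs : pvIsStop l = false := by
          simp [pvIsStop, h1, h2a, h2b]
        by_cases h3 : PySem.Chars.startswith l.toList ['-'] = true
        · have hplus := sw_single_disj l.toList '-' '+' (by decide) h3
          have hbsl := sw_single_disj l.toList '-' '\\' (by decide) h3
          simp [pvCountA, h1, h2a, h2b, hs, h3, hplus, hbsl,
            pvOldLine, pvNewLine, ih, Prod.mk.injEq]
          omega
        · by_cases h4 : PySem.Chars.startswith l.toList ['+'] = true
          · have hbsl := sw_single_disj l.toList '+' '\\' (by decide) h4
            simp [pvCountA, h1, h2a, h2b, hs, h3, h4, hbsl,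
              pvOldLine, pvNewLine, ih, Prod.mk.injEq]
            omega
          · by_cases h5 : (PySem.Chars.startswith l.toList [' '] = true ∨ l = "")
            · have hbsl : PySem.Chars.startswith l.toList ['\\'] = false := by
                rcases h5 with h | h
                · exact sw_single_disj l.toList ' ' '\\' (by decide) h
                · subst h; decide
              simp [pvCountA, h1, h2a, h2b, hs, h3, h4, h5, hbsl,
                pvOldLine, pvNewLine, ih, Prod.mk.injEq]
              omega
            · by_cases h6 : PySem.Chars.startswith l.toList ['\\'] = true
              · simp [pvCountA, h1, h2a, h2b, hs, h3, h4, h5, h6,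
                  pvOldLine, pvNewLine, ih, Prod.mk.injEq]
              · simp [pvCountA, h1, h2a, h2b, hs, h3, h4, h5, h6,
                  pvOldLine, pvNewLine, ih, Prod.mk.injEq]
                omega

-- ===== VERDICT (by name: the statement is the Claim_ definition above) =====
theorem count_hunk_lines_spec : Claim_equal_count_hunk_lines := by
  intro lines _
  unfold Spec_count_hunk_lines count_hunk_lines count_hunk_lines_alt
  simpa using main_lemma lines 0 0
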